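-- pv_equiv track=rewrite | github.com/NBU8HC/Bang | Split_parameter_tool/split_parameter_pro.py | extract_all_parameters
-- ===== SOURCE A (Python) =====
-- def extract_all_parameters(content):
--     """Extract all parameters from DCM content efficiently in one pass."""
--     parameters = []
--     keywords = ("KENNLINIE", "KENNFELD", "FESTWERT", "GRUPPENKENNLINIE")
--
--     lines = content.split('\n')
--     i = 0
--
--     while i < len(lines):
--         stripped = lines[i].strip()
--
--         # Check if this line starts a parameter definition
--         if stripped.startswith(keywords):
--             parts = stripped.split()
--             if len(parts) > 1:
--                 param_name = parts[1]
--                 param_type = parts[0]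
--
--                 # Collect the entire block until END
--                 block_lines = [lines[i]]
--                 i += 1
--
--                 while i < len(lines):
--                     block_lines.append(lines[i])
--                     if lines[i].strip() == 'END':
--                         break
--                     i += 1
--
--                 block = '\n'.join(block_lines)
--
--                 # Extract value from block
--                 param_value = ""
--                 for line in block_lines:
--                     line_stripped = line.strip()
--                     if line_stripped.startswith('WERT') or line_stripped.startswith('TEXT'):
--                         value_parts = line_stripped.split(maxsplit=1)
--                         if len(value_parts) > 1:
--                             param_value = value_parts[1]
--                         break
--
--                 # Add to parameters list
--                 parameters.append({
--                     'name': param_name,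
--                     'type': param_type,
--                     'value': param_value,
--                     'block': block
--                 })
--
--         i += 1
--
--     return parameters
-- ===== SOURCE B (Python) =====
-- def extract_all_parameters(content):
--     """Extract all parameters from DCM content with a flat state-machine pass."""
--     parameters = []
--     keywords = ("KENNLINIE", "KENNFELD", "FESTWERT", "GRUPPENKENNLINIE")
--     in_block = False
--     block_lines = []
--     name = typ = value = ""
--     captured = False
--     for line in content.split('\n'):
--         stripped = line.strip()
--         if in_block:
--             block_lines.append(line)
--             if not captured and (stripped.startswith('WERT') or stripped.startswith('TEXT')):
--                 captured = True
--                 parts = stripped.split(maxsplit=1)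
--                 if len(parts) > 1:
--                     value = parts[1]
--             if stripped == 'END':
--                 parameters.append({'name': name, 'type': typ, 'value': value,
--                                    'block': '\n'.join(block_lines)})
--                 in_block = False
--         elif stripped.startswith(keywords):
--             parts = stripped.split()
--             if len(parts) > 1:
--                 in_block = True
--                 block_lines = [line]
--                 name, typ = parts[1], parts[0]
--                 value = ""
--                 captured = False
--     if in_block:
--         parameters.append({'name': name, 'type': typ, 'value': value,
--                            'block': '\n'.join(block_lines)})
--     return parameters
-- ===== Notes on version B (the rewrite author's own statement) =====
-- stated objective: simpler
-- what changed: Replaced A's nested index-walking while-loops plus a separate post-hoc scan of the collected block for the WERT/TEXT value by a single flat state-machine pass over the lines that captures the value on the fly and flushes an open block at EOF.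
import Mathlib
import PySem

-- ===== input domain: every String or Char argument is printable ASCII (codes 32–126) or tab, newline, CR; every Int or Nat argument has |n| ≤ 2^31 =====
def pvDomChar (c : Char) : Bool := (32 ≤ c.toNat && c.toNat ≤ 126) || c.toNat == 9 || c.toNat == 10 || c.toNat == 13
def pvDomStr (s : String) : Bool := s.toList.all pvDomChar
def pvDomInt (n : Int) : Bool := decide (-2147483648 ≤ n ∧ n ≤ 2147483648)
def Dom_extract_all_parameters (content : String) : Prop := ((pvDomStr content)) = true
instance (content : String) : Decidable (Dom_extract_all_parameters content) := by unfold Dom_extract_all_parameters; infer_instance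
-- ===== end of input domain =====

-- B re-implements A's nested index-walking scan as one flat state-machine pass over the lines
-- (objective: simpler decomposition, same linear cost); return values proven equal on all inputs.

-- the result dict {'name':…, 'type':…, 'value':…, 'block':…} as an association list
def pvMk (name typ value block : String) : List (String × String) :=
  [("name", name), ("type", typ), ("value", value), ("block", block)]

-- stripped.startswith(keywords)  (the tuple test shared by both Pythons)
def pvIsKw (s : String) : Bool :=
  PySem.Str.startswith s "KENNLINIE" || PySem.Str.startswith s "KENNFELD" ||
  PySem.Str.startswith s "FESTWERT" || PySem.Str.startswith s "GRUPPENKENNLINIE"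

-- line_stripped.startswith('WERT') or line_stripped.startswith('TEXT')
def pvIsWT (s : String) : Bool :=
  PySem.Str.startswith s "WERT" || PySem.Str.startswith s "TEXT"

-- ===== PORT A =====
-- inner `while`: collect block_lines (starting from acc) until a line strips to 'END';
-- returns (block_lines, remaining lines after the loop and the outer `i += 1`)
def pvCollect : List String → List String → List String × List String
  | [], acc => (acc, [])
  | l :: rs, acc =>
      let acc' := acc ++ [l]
      if PySem.Str.strip l == "END" then (acc', rs) else pvCollect rs acc'

-- the `for line in block_lines` value-extraction loop (break on first WERT/TEXT line)
def pvValue : List String → String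
  | [] => ""
  | l :: rest =>
      let ls := PySem.Str.strip l
      if pvIsWT ls then
        match PySem.Str.split₀Max ls 1 with
        | _ :: v :: _ => v
        | _ => ""
      else pvValue rest

theorem pvCollect_len : ∀ (rs acc : List String), (pvCollect rs acc).2.length ≤ rs.length := by
  intro rs
  induction rs with
  | nil => intro acc; simp [pvCollect]
  | cons l rs ih =>
      intro acc
      simp only [pvCollect]
      split
      · simp
      · exact le_trans (ih _) (Nat.le_succ _)

-- outer `while i < len(lines)` loop of A
def pvALoop : List String → List (List (String × String))
  | [] => []
  | l :: rest =>
      let s := PySem.Str.strip l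
      if pvIsKw s then
        match PySem.Str.split₀ s with
        | t :: n :: _ =>
            let pr := pvCollect rest [l]
            pvMk n t (pvValue pr.1) (PySem.Str.join "\n" pr.1) :: pvALoop pr.2
        | _ => pvALoop rest
      else pvALoop rest
termination_by ls => ls.length
decreasing_by
  · exact Nat.lt_succ_of_le (pvCollect_len rest [l])
  · simp
  · simp

def extract_all_parameters (content : String) : List (List (String × String)) :=
  pvALoop ((PySem.Str.split? content "\n").getD [])

-- ===== PORT B =====
structure PVState where
  params : List (List (String × String))
  inBlock : Bool
  blockLines : List String
  name : String
  typ : String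
  value : String
  captured : Bool

-- B's on-the-fly value capture: the first WERT/TEXT line (if any) fixes the value
def pvScan (vc : String × Bool) (line : String) : String × Bool :=
  let stripped := PySem.Str.strip line
  if !vc.2 && pvIsWT stripped then
    (match PySem.Str.split₀Max stripped 1 with
     | _ :: v :: _ => v
     | _ => vc.1, true)
  else vc

-- one step of B's flat state machine
def pvBStep (st : PVState) (line : String) : PVState :=
  let stripped := PySem.Str.strip line
  if st.inBlock then
    let bl := st.blockLines ++ [line]
    let vc := pvScan (st.value, st.captured) line
    if stripped == "END" then
      { st with params := st.params ++ [pvMk st.name st.typ vc.1 (PySem.Str.join "\n" bl)],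
                inBlock := false, blockLines := bl, value := vc.1, captured := vc.2 }
    else
      { st with blockLines := bl, value := vc.1, captured := vc.2 }
  else if pvIsKw stripped then
    match PySem.Str.split₀ stripped with
    | t :: n :: _ =>
        { st with inBlock := true, blockLines := [line], name := n, typ := t,
                  value := "", captured := false }
    | _ => st
  else st

-- run the machine over the lines, then flush a still-open block at EOF
def pvBRun (st : PVState) (lines : List String) : List (List (String × String)) :=
  let f := lines.foldl pvBStep st
  f.params ++ (if f.inBlock then [pvMk f.name f.typ f.value (PySem.Str.join "\n" f.blockLines)] else [])

def extract_all_parameters_alt (content : String) : List (List (String × String)) :=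
  pvBRun ⟨[], false, [], "", "", "", false⟩ ((PySem.Str.split? content "\n").getD [])

-- ===== PRECONDITION & SPEC =====
def Spec_extract_all_parameters (content : String) (out : List (List (String × String))) : Prop := out = extract_all_parameters_alt content
instance (content : String) (out : List (List (String × String))) : Decidable (Spec_extract_all_parameters content out) := by unfold Spec_extract_all_parameters; infer_instance

-- ===== CLAIM (what is proved, stated in full; the proofs are below) =====
def Claim_equal_extract_all_parameters : Prop := ∀ (content : String), Dom_extract_all_parameters content → Spec_extract_all_parameters content (extract_all_parameters content)

-- ===== LEMMAS AND PROOFS =====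

-- once captured, the scan state is frozen
theorem pvScan_absorb : ∀ (ls : List String) (v : String),
    ls.foldl pvScan (v, true) = (v, true) := by
  intro ls
  induction ls with
  | nil => intro v; rfl
  | cons l rs ih => intro v; simp only [List.foldl, pvScan]; simp; exact ih v

-- a non-WERT/TEXT line leaves an uncaptured scan state unchanged
theorem pvScan_false (l : String) (h : pvIsWT (PySem.Str.strip l) = false) (v : String) :
    pvScan (v, false) l = (v, false) := by
  unfold pvScan
  rw [if_neg]
  simp [h]

-- B's incremental scan computes exactly A's post-hoc value extraction
theorem pvScan_eq_pvValue : ∀ (bl : List String),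
    (bl.foldl pvScan ("", false)).1 = pvValue bl := by
  intro bl
  induction bl with
  | nil => rfl
  | cons l rs ih =>
      simp only [List.foldl, pvValue]
      by_cases h : pvIsWT (PySem.Str.strip l) = true
      · simp only [pvScan, h, Bool.not_false, Bool.true_and, if_true]
        simp [pvScan_absorb]
      · rw [Bool.not_eq_true] at h
        rw [pvScan_false l h, h]
        simp only [Bool.false_eq_true, if_false]
        exact ih

-- a line whose strip starts with one of the parameter keywords cannot start with WERT or TEXT
theorem pvKw_not_wt (s : String) (h : pvIsKw s = true) : pvIsWT s = false := by
  have hcmp : ∀ (p q : List Char), p <+: s.toList → q <+: s.toList →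
      ¬ p <+: q → ¬ q <+: p → False := by
    intro p q hp hq h1 h2
    rcases List.prefix_or_prefix_of_prefix hp hq with h' | h' <;> [exact h1 h'; exact h2 h']
  rw [Bool.eq_false_iff]
  intro hwt
  unfold pvIsWT at hwt
  unfold pvIsKw at h
  simp only [Bool.or_eq_true, PySem.Str.startswith_eq, PySem.Chars.startswith_iff] at h hwt
  rcases hwt with hw | hw <;>
    rcases h with ((hk | hk) | hk) | hk <;>
      exact hcmp _ _ hk hw (by decide) (by decide)

-- the in-block phase of B tracks A's pvCollect (END found or EOF: same emitted dict, same rest)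
theorem pvInBlock : ∀ (rest : List String) (params : List (List (String × String)))
    (acc : List String) (n t v : String) (c : Bool),
    (v, c) = acc.foldl pvScan ("", false) →
    pvBRun ⟨params, true, acc, n, t, v, c⟩ rest =
    pvBRun ⟨params ++ [pvMk n t ((pvCollect rest acc).1.foldl pvScan ("", false)).1
                            (PySem.Str.join "\n" (pvCollect rest acc).1)],
            false, (pvCollect rest acc).1, n, t,
            ((pvCollect rest acc).1.foldl pvScan ("", false)).1,
            ((pvCollect rest acc).1.foldl pvScan ("", false)).2⟩ (pvCollect rest acc).2 := by
  intro rest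
  induction rest with
  | nil =>
      intro params acc n t v c hvc
      simp only [pvCollect, pvBRun, List.foldl]
      rw [← hvc]
      simp
  | cons l rs ih =>
      intro params acc n t v c hvc
      simp only [pvCollect]
      have hstep : pvBStep ⟨params, true, acc, n, t, v, c⟩ l =
          (let vc := pvScan (v, c) l
           if PySem.Str.strip l == "END" then
             ({ params := params ++ [pvMk n t vc.1 (PySem.Str.join "\n" (acc ++ [l]))],
                inBlock := false, blockLines := acc ++ [l], name := n, typ := t,
                value := vc.1, captured := vc.2 } : PVState)
           else
             { params := params, inBlock := true, blockLines := acc ++ [l], name := n, typ := t,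
               value := vc.1, captured := vc.2 }) := by
        simp [pvBStep]
      have hfold : (acc ++ [l]).foldl pvScan ("", false) = pvScan (v, c) l := by
        rw [List.foldl_append, ← hvc]; rfl
      by_cases hend : (PySem.Str.strip l == "END") = true
      · simp only [pvBRun, List.foldl_cons, hstep, hend, if_true]
        rw [hfold]
      · simp only [Bool.not_eq_true] at hend
        simp only [pvBRun] at ih ⊢
        simp only [List.foldl_cons, hstep, hend, Bool.false_eq_true, if_false]
        exact ih params (acc ++ [l]) n t (pvScan (v, c) l).1 (pvScan (v, c) l).2
          (by rw [hfold])

-- the idle phase of B tracks A's outer loop (junk in the other state fields is irrelevant)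
theorem pvIdle : ∀ (N : Nat) (lines : List String), lines.length ≤ N →
    ∀ (params : List (List (String × String))) (bl : List String) (n t v : String) (c : Bool),
    pvBRun ⟨params, false, bl, n, t, v, c⟩ lines = params ++ pvALoop lines := by
  intro N
  induction N with
  | zero =>
      intro lines hlen params bl n t v c
      have : lines = [] := List.eq_nil_of_length_eq_zero (Nat.le_zero.mp hlen)
      subst this
      simp [pvBRun, pvALoop, List.foldl]
  | succ N ih =>
      intro lines hlen params bl n t v c
      cases lines with
      | nil => simp [pvBRun, pvALoop, List.foldl]
      | cons l rest =>
          simp only [List.length_cons, Nat.succ_le_succ_iff] at hlen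
          by_cases hkw : pvIsKw (PySem.Str.strip l) = true
          · cases hsp : PySem.Str.split₀ (PySem.Str.strip l) with
            | nil =>
                have hstep : pvBStep ⟨params, false, bl, n, t, v, c⟩ l =
                    ⟨params, false, bl, n, t, v, c⟩ := by
                  simp [pvBStep, hkw, hsp]
                simp only [pvBRun, List.foldl_cons, hstep]
                have := ih rest hlen params bl n t v c
                simp only [pvBRun] at this
                rw [this]
                simp only [pvALoop, hkw, if_true, hsp]
            | cons t' tl =>
                cases tl with
                | nil =>
                    have hstep : pvBStep ⟨params, false, bl, n, t, v, c⟩ l =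
                        ⟨params, false, bl, n, t, v, c⟩ := by
                      simp [pvBStep, hkw, hsp]
                    simp only [pvBRun, List.foldl_cons, hstep]
                    have := ih rest hlen params bl n t v c
                    simp only [pvBRun] at this
                    rw [this]
                    simp only [pvALoop, hkw, if_true, hsp]
                | cons n' tl' =>
                    have hstep : pvBStep ⟨params, false, bl, n, t, v, c⟩ l =
                        ⟨params, true, [l], n', t', "", false⟩ := by
                      simp [pvBStep, hkw, hsp]
                    have hscan1 : ("", false) = ([l]).foldl pvScan ("", false) := by
                      have hwt := pvKw_not_wt _ hkw
                      simp [List.foldl, pvScan, hwt]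
                    have hib := pvInBlock rest params [l] n' t' "" false hscan1
                    have hrem : (pvCollect rest [l]).2.length ≤ N :=
                      le_trans (pvCollect_len rest [l]) hlen
                    have hid := ih (pvCollect rest [l]).2 hrem
                      (params ++ [pvMk n' t' ((pvCollect rest [l]).1.foldl pvScan ("", false)).1
                        (PySem.Str.join "\n" (pvCollect rest [l]).1)])
                      (pvCollect rest [l]).1 n' t'
                      ((pvCollect rest [l]).1.foldl pvScan ("", false)).1
                      ((pvCollect rest [l]).1.foldl pvScan ("", false)).2
                    simp only [pvBRun, List.foldl_cons, hstep] at hib hid ⊢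
                    rw [hib, hid]
                    simp only [pvALoop, hkw, if_true, hsp]
                    rw [pvScan_eq_pvValue]
                    simp
          · rw [Bool.not_eq_true] at hkw
            have hstep : pvBStep ⟨params, false, bl, n, t, v, c⟩ l =
                ⟨params, false, bl, n, t, v, c⟩ := by
              simp [pvBStep, hkw]
            simp only [pvBRun, List.foldl_cons, hstep]
            have := ih rest hlen params bl n t v c
            simp only [pvBRun] at this
            rw [this]
            simp only [pvALoop, hkw, Bool.false_eq_true, if_false]

-- ===== VERDICT (by name: the statement is the Claim_ definition above) =====
theorem extract_all_parameters_spec : Claim_equal_extract_all_parameters := by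
  intro content _
  unfold Spec_extract_all_parameters extract_all_parameters extract_all_parameters_alt
  rw [pvIdle ((PySem.Str.split? content "\n").getD []).length _ le_rfl]
  simp
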